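-- pv_equiv track=rewrite | github.com/greenelab/PathCORE-T | pathcore/network.py | _permutation_correctness
-- ===== SOURCE A (Python) =====
-- def _permutation_correctness(pathway_feature_tuples, original):
--     """Determine whether the generated permutation is a valid permutation.
--     Used in `permute_pathways_across_features`.
--     (Cannot be identical to the original significant pathways list,
--     and a feature should map to a distinct set of pathways.)
--     """
--     if pathway_feature_tuples:
--         if set(pathway_feature_tuples) == set(original):
--             return False
--         pathways_in_feature = {}
--         for (pathway, feature) in pathway_feature_tuples:
--             if feature not in pathways_in_feature:
--                 pathways_in_feature[feature] = set()
--             if pathway in pathways_in_feature[feature]: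
--                 return False
--             else:
--                 pathways_in_feature[feature].add(pathway)
--     return True
-- ===== SOURCE B (Python) =====
-- def _permutation_correctness(pathway_feature_tuples, original):
--     """Valid permutation: not identical (as a set) to the original, and no
--     (pathway, feature) pair occurs twice (a repeat pair == a pathway repeated
--     within one feature)."""
--     if pathway_feature_tuples:
--         s = set(pathway_feature_tuples)
--         if s == set(original):
--             return False
--         if len(s) != len(pathway_feature_tuples):
--             return False
--     return True
-- ===== Notes on version B (the rewrite author's own statement) =====
-- stated objective: simpler
-- what changed: Replaces the per-feature dict-of-sets incremental duplicate-detection loop with a single set-cardinality comparison: len(set(tuples)) != len(tuples) detects a pathway repeated within a feature, so the loop and the maintained dict disappear.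
import Mathlib
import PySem

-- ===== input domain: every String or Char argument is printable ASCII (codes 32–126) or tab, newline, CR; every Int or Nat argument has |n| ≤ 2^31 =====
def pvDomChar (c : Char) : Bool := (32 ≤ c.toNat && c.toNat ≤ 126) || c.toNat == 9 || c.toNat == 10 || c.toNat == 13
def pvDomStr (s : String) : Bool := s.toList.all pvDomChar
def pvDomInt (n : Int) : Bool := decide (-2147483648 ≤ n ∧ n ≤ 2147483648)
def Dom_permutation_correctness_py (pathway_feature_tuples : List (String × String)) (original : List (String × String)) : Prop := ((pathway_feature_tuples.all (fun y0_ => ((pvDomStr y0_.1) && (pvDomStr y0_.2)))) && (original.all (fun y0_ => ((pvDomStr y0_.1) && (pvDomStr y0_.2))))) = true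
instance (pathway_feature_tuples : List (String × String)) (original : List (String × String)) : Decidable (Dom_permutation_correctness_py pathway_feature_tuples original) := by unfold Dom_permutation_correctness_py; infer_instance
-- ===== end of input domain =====

-- B replaces A's per-feature dict-of-sets duplicate-detection loop with a single
-- set-cardinality comparison (len(set(tuples)) vs len(tuples)); objective: simpler.


-- ===== PORT A =====
-- the 'for (pathway, feature) in pathway_feature_tuples' loop with its early 'return False'
def pcLoop (xs : List (String × String)) (d : PySem.Dict String (PySem.Set String)) : Bool :=
  match xs with
  | [] => true
  | (pathway, feature) :: rest =>
    let d1 := if d.contains feature then d else d.insert feature PySem.Set.empty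
    let s := d1.getD feature PySem.Set.empty
    if s.contains pathway then false
    else pcLoop rest (d1.insert feature (s.add pathway))

def permutation_correctness_py (pathway_feature_tuples : List (String × String)) (original : List (String × String)) : Bool :=
  if !pathway_feature_tuples.isEmpty then
    if PySem.Set.equal (PySem.Set.ofList pathway_feature_tuples) (PySem.Set.ofList original) then false
    else pcLoop pathway_feature_tuples PySem.Dict.empty
  else true

-- ===== PORT B =====
def permutation_correctness_py_alt (pathway_feature_tuples : List (String × String)) (original : List (String × String)) : Bool :=
  if !pathway_feature_tuples.isEmpty then
    let s := PySem.Set.ofList pathway_feature_tuples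
    if PySem.Set.equal s (PySem.Set.ofList original) then false
    else if PySem.Set.len s ≠ (pathway_feature_tuples.length : Int) then false
    else true
  else true

-- ===== PRECONDITION & SPEC =====
def Spec_permutation_correctness_py (pathway_feature_tuples : List (String × String)) (original : List (String × String)) (out : Bool) : Prop := out = permutation_correctness_py_alt pathway_feature_tuples original
instance (pathway_feature_tuples : List (String × String)) (original : List (String × String)) (out : Bool) : Decidable (Spec_permutation_correctness_py pathway_feature_tuples original out) := by unfold Spec_permutation_correctness_py; infer_instance

-- ===== CLAIM (what is proved, stated in full; the proofs are below) =====
def Claim_equal_permutation_correctness_py : Prop := ∀ (pathway_feature_tuples : List (String × String)) (original : List (String × String)), Dom_permutation_correctness_py pathway_feature_tuples original → Spec_permutation_correctness_py pathway_feature_tuples original (permutation_correctness_py pathway_feature_tuples original)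

-- ===== LEMMAS AND PROOFS =====

-- length upper bound for folding Set.add
theorem foldl_add_length_le {α : Type} [BEq α] (xs : List α) (s : PySem.Set α) :
    (xs.foldl PySem.Set.add s).length ≤ s.length + xs.length := by
  induction xs generalizing s with
  | nil => simp
  | cons x xs ih =>
    simp only [List.foldl_cons]
    refine le_trans (ih _) ?_
    have : (s.add x).length ≤ s.length + 1 := by
      unfold PySem.Set.add
      split <;> simp
    simp only [List.length_cons]
    omega

-- len(set(xs)) = len(xs) iff xs has no duplicates (generalized over the accumulator)
theorem foldl_add_length_eq_iff {α : Type} [BEq α] [LawfulBEq α] (xs : List α) (s : PySem.Set α) :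
    (xs.foldl PySem.Set.add s).length = s.length + xs.length ↔ xs.Nodup ∧ ∀ x ∈ xs, x ∉ s := by
  induction xs generalizing s with
  | nil => simp
  | cons x xs ih =>
    simp only [List.foldl_cons, List.length_cons, List.nodup_cons]
    by_cases hx : x ∈ s
    · have hadd : s.add x = s := by
        unfold PySem.Set.add
        simp [hx]
      rw [hadd]
      have hle := foldl_add_length_le xs s
      constructor
      · intro h; omega
      · rintro ⟨-, h⟩; exact absurd hx (h x (by simp))
    · have hadd : s.add x = s ++ [x] := by
        unfold PySem.Set.add
        simp [hx]
      rw [hadd]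
      have hlen : List.length s + (xs.length + 1) = List.length (s ++ [x]) + xs.length := by
        simp only [List.length_append, List.length_singleton]; omega
      rw [hlen, ih]
      simp only [List.mem_append, List.mem_singleton]
      constructor
      · rintro ⟨hnd, h⟩
        refine ⟨⟨fun hmem => (h x hmem) (Or.inr rfl), hnd⟩, ?_⟩
        intro y hy
        rcases List.mem_cons.1 hy with rfl | hy
        · exact hx
        · exact fun hys => (h y hy) (Or.inl hys)
      · rintro ⟨⟨hxs, hnd⟩, h⟩
        refine ⟨hnd, fun y hy hor => ?_⟩
        rcases hor with hys | rfl
        · exact h y (List.mem_cons_of_mem _ hy) hys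
        · exact hxs hy

theorem ofList_length_eq_iff {α : Type} [BEq α] [LawfulBEq α] (xs : List α) :
    (PySem.Set.ofList xs).length = xs.length ↔ xs.Nodup := by
  have := foldl_add_length_eq_iff xs (PySem.Set.empty (α := α))
  simpa [PySem.Set.ofList, PySem.Set.empty] using this

-- the loop detects exactly a repeated (pathway, feature) pair, relative to the pathways already recorded in d
theorem pcLoop_eq_true_iff (xs : List (String × String)) (d : PySem.Dict String (PySem.Set String)) :
    pcLoop xs d = true ↔ xs.Nodup ∧ ∀ p f, (p, f) ∈ xs → p ∉ d.getD f PySem.Set.empty := by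
  induction xs generalizing d with
  | nil => simp [pcLoop]
  | cons pf rest ih =>
    obtain ⟨p, f⟩ := pf
    have hs : (if d.contains f then d else d.insert f PySem.Set.empty).getD f PySem.Set.empty
        = d.getD f PySem.Set.empty := by
      by_cases hc : d.contains f = true
      · simp [hc]
      · rw [if_neg (by simp [hc]), PySem.Dict.getD_insert,
          PySem.Dict.getD_of_not_contains d _ (by simp [hc])]
        simp
    set d1 := if d.contains f then d else d.insert f PySem.Set.empty with hd1
    have hg : ∀ g, (d1.insert f ((d.getD f PySem.Set.empty).add p)).getD g PySem.Set.empty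
        = if g = f then (d.getD f PySem.Set.empty).add p else d.getD g PySem.Set.empty := by
      intro g
      rw [PySem.Dict.getD_insert]
      by_cases hgf : g = f
      · simp [hgf]
      · rw [if_neg hgf, if_neg hgf, hd1]
        by_cases hc : d.contains f = true
        · simp [hc]
        · rw [if_neg (by simp [hc]), PySem.Dict.getD_insert, if_neg hgf]
    show (if (d1.getD f PySem.Set.empty).contains p then false
          else pcLoop rest (d1.insert f ((d1.getD f PySem.Set.empty).add p))) = true ↔ _
    rw [hs]
    by_cases hp : p ∈ d.getD f PySem.Set.empty
    · rw [if_pos (by simpa [PySem.Set.contains, List.elem_iff, PySem.Set.empty] using hp)]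
      simp only [Bool.false_eq_true, false_iff, not_and]
      intro _ h
      exact (h p f (by simp)) hp
    · rw [if_neg (by simpa [PySem.Set.contains, List.elem_iff, PySem.Set.empty] using hp), ih]
      constructor
      · rintro ⟨hnd, h⟩
        have hmem : (p, f) ∉ rest := by
          intro hin
          have := h p f hin
          rw [hg f, if_pos rfl] at this
          exact this ((PySem.Set.mem_add _ _ _).2 (Or.inr rfl))
        refine ⟨List.nodup_cons.2 ⟨hmem, hnd⟩, ?_⟩
        intro q g hqg
        rcases List.mem_cons.1 hqg with heq | hin
        · injection heq with h1 h2
          subst h1; subst h2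
          exact hp
        · have := h q g hin
          rw [hg g] at this
          by_cases hgf : g = f
          · rw [if_pos hgf] at this
            intro hq
            exact this ((PySem.Set.mem_add _ _ _).2 (Or.inl (by rw [← hgf]; exact hq)))
          · rwa [if_neg hgf] at this
      · rintro ⟨hnd, h⟩
        obtain ⟨hpf, hnd'⟩ := List.nodup_cons.1 hnd
        refine ⟨hnd', ?_⟩
        intro q g hin
        rw [hg g]
        by_cases hgf : g = f
        · rw [if_pos hgf]
          intro hq
          rcases (PySem.Set.mem_add _ _ _).1 hq with hq | rfl
          · exact (h q g (List.mem_cons_of_mem _ hin)) (by rw [← hgf] at hq; exact hq)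
          · exact hpf (by rw [← hgf]; exact hin)
        · rw [if_neg hgf]
          exact h q g (List.mem_cons_of_mem _ hin)

theorem pcLoop_empty (xs : List (String × String)) :
    pcLoop xs PySem.Dict.empty = true ↔ xs.Nodup := by
  rw [pcLoop_eq_true_iff]
  simp [PySem.Dict.getD, PySem.Dict.get?, PySem.Dict.empty, PySem.Set.empty]

-- ===== VERDICT (by name: the statement is the Claim_ definition above) =====
theorem permutation_correctness_py_spec : Claim_equal_permutation_correctness_py := by
  intro t o _
  unfold Spec_permutation_correctness_py permutation_correctness_py permutation_correctness_py_alt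
  by_cases h1 : t.isEmpty
  · simp [h1]
  · simp only [h1, Bool.not_false, if_true]
    by_cases h2 : PySem.Set.equal (PySem.Set.ofList t) (PySem.Set.ofList o) = true
    · simp [h2]
    · simp only [h2, Bool.false_eq_true, if_false]
      by_cases h3 : t.Nodup
      · rw [if_neg]
        · exact (pcLoop_empty t).2 h3
        · simp only [PySem.Set.len, ne_eq, Nat.cast_inj, not_not]
          exact (ofList_length_eq_iff t).2 h3
      · rw [if_pos]
        · exact Bool.not_eq_true _ ▸ (by
            have := (pcLoop_empty t).not.2 h3
            simpa using this)
        · simp only [PySem.Set.len, ne_eq, Nat.cast_inj]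
          exact fun h => h3 ((ofList_length_eq_iff t).1 h)
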